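-- pv_equiv track=rewrite | github.com/AndrewSushi/CS211 | CodeDemos/test.py | some_col_all_pos
-- ===== SOURCE A (Python) =====
-- from typing import List
--
-- def some_col_all_pos(m: List[List[int]]) -> bool:
--     """True iff some column is all greater than zero.
--     m is assumed to be a rectangular matrix (all rows are the same length)
--     Examples: some_col_all_pos([]) == False because it has no columns
--     some_col_all_pos([[]]) == False because it has no columns
--     some_col_all_pos([[42]]) == True but some_col_all_pos([[0]])) == False
--     some_col_all_pos([[1, 0], [2, -3]]) == True because [1,2] is all positive
--     some_col_all_pos([[0, 0, 1, 1],[1, 2, 3, 4], [8, 7, 1, 0]])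
--     == True because [1, 3, 1] is all positive
--     """
--     if len(m) == 0:
--         return False
--     col_num = len(m[0])
--     for col_i in range(col_num):
--         flag1 = True
--         for row in m:
--             if row[col_i] <= 0:
--                 flag1 = False
--         if flag1:
--             return True
--     return False
-- ===== SOURCE B (Python) =====
-- from typing import List
--
-- def some_col_all_pos(m: List[List[int]]) -> bool:
--     """Single row-major pass keeping a per-column 'still all positive' mask."""
--     if len(m) == 0:
--         return False
--     mask = [True] * len(m[0])
--     for row in m:
--         mask = [f and (x > 0) for f, x in zip(mask, row)]
--     return any(mask)
-- ===== Notes on version B (the rewrite author's own statement) =====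
-- stated objective: alternative
-- what changed: Replaced A's column-outer/row-inner double scan with a single row-major pass that folds a per-column boolean mask over the rows and finally checks any(mask).
-- outside the precondition, e.g. on some_col_all_pos([[1, 2], [1]]): A returns True, B returns True; on some_col_all_pos([[0, 2], [1]]): A raises IndexError, B returns False
import Mathlib
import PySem

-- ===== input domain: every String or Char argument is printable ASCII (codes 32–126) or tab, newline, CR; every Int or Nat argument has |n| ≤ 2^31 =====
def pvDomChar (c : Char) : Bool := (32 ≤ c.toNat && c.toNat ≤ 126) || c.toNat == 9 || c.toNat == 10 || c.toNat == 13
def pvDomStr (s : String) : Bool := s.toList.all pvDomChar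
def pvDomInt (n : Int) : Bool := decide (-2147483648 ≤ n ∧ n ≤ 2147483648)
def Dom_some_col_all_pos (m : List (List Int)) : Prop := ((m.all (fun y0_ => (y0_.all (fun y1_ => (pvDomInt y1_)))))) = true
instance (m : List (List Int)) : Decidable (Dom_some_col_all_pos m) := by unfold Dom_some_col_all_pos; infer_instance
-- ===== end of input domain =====

-- B replaces A's column-by-column re-scan with one row-major pass over a per-column mask; objective: alternative decomposition, same cost.

-- ===== PORT A =====
-- inner 'for row in m' loop of A (row[col_i] is in range under Pre_)
def pvInner (m : List (List Int)) (i : Int) : Bool :=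
  m.foldl (fun flag row => if PySem.List.pyGetD row i 0 ≤ 0 then false else flag) true

-- outer 'for col_i in range(col_num)' loop with A's early 'return True'
def pvALoop (m : List (List Int)) : List Int → Bool
  | [] => false
  | i :: rest => if pvInner m i then true else pvALoop m rest

def some_col_all_pos (m : List (List Int)) : Bool :=
  if m.length = 0 then false
  else pvALoop m (PySem.List.pyRange 0 ((m.headD []).length : Int) 1)

-- ===== PORT B =====
def some_col_all_pos_alt (m : List (List Int)) : Bool :=
  match m with
  | [] => false
  | r0 :: rest =>
      (((r0 :: rest).foldl
          (fun mask row => List.zipWith (fun f x => f && decide (0 < x)) mask row)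
          (List.replicate r0.length true)).any id)

-- ===== PRECONDITION & SPEC =====
-- Pre_ keeps the documented domain ("m is assumed to be a rectangular matrix"): every row at
-- least as long as the first; on shorter rows A raises IndexError (or, if it returned True
-- early, that early value is an accident of its column order which B happens to match anyway).
def Pre_some_col_all_pos (m : List (List Int)) : Prop :=
  ∀ row ∈ m, (m.headD []).length ≤ row.length
instance (m : List (List Int)) : Decidable (Pre_some_col_all_pos m) := by unfold Pre_some_col_all_pos; infer_instance
def pvWitness_some_col_all_pos : List (List Int) := [[1, 0], [2, -3]]

def Spec_some_col_all_pos (m : List (List Int)) (out : Bool) : Prop := out = some_col_all_pos_alt m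
instance (m : List (List Int)) (out : Bool) : Decidable (Spec_some_col_all_pos m out) := by unfold Spec_some_col_all_pos; infer_instance

-- ===== CLAIM (what is proved, stated in full; the proofs are below) =====
def Claim_equal_some_col_all_pos : Prop := ∀ (m : List (List Int)), Dom_some_col_all_pos m → Pre_some_col_all_pos m → Spec_some_col_all_pos m (some_col_all_pos m)

-- ===== LEMMAS AND PROOFS =====

-- the common spec both sides reach: column j of rows is all positive
def pvColB (rows : List (List Int)) (j : Nat) : Bool :=
  rows.all (fun row => decide (0 < row.getD j 0))

theorem pvInner_eq (rows : List (List Int)) (i : Int) (b : Bool) :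
    rows.foldl (fun flag row => if PySem.List.pyGetD row i 0 ≤ 0 then false else flag) b
      = (b && rows.all (fun row => decide (0 < PySem.List.pyGetD row i 0))) := by
  induction rows generalizing b with
  | nil => simp
  | cons r rs ih =>
      simp only [List.foldl_cons, List.all_cons, ih]
      by_cases h : PySem.List.pyGetD r i 0 ≤ 0 <;> cases b <;> simp_all

theorem pvInner_natCast (m : List (List Int)) (j : Nat) :
    pvInner m (j : Int) = pvColB m j := by
  unfold pvInner pvColB
  rw [pvInner_eq]
  simp [PySem.List.pyGetD_natCast]

theorem pvALoop_any (m : List (List Int)) (l : List Int) :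
    pvALoop m l = l.any (pvInner m) := by
  induction l with
  | nil => rfl
  | cons i rest ih => simp [pvALoop, ih]

theorem pvFold_len (rows : List (List Int)) (mask : List Bool)
    (h : ∀ row ∈ rows, mask.length ≤ row.length) :
    (rows.foldl (fun mask row => List.zipWith (fun f x => f && decide (0 < x)) mask row) mask).length
      = mask.length := by
  induction rows generalizing mask with
  | nil => rfl
  | cons r rs ih =>
      simp only [List.foldl_cons]
      rw [ih]
      · simp [List.length_zipWith, Nat.min_eq_left (h r (by simp))]
      · intro row hr
        simp only [List.length_zipWith, Nat.min_eq_left (h r (by simp))]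
        exact h row (by simp [hr])

theorem pvFold_get (rows : List (List Int)) (mask : List Bool)
    (h : ∀ row ∈ rows, mask.length ≤ row.length) (j : Nat) (hj : j < mask.length) :
    (rows.foldl (fun mask row => List.zipWith (fun f x => f && decide (0 < x)) mask row) mask)[j]'
        (by rw [pvFold_len rows mask h]; exact hj)
      = (mask[j] && pvColB rows j) := by
  induction rows generalizing mask with
  | nil => simp [pvColB]
  | cons r rs ih =>
      have hr : mask.length ≤ r.length := h r (by simp)
      have hlen : (List.zipWith (fun f x => f && decide (0 < x)) mask r).length = mask.length := by
        simp [List.length_zipWith, Nat.min_eq_left hr]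
      simp only [List.foldl_cons]
      rw [ih (List.zipWith (fun f x => f && decide (0 < x)) mask r)
          (by intro row hrow; rw [hlen]; exact h row (by simp [hrow])) (by rw [hlen]; exact hj)]
      have : (List.zipWith (fun f x => f && decide (0 < x)) mask r)[j]'(by rw [hlen]; exact hj)
          = (mask[j] && decide (0 < r[j]'(Nat.lt_of_lt_of_le hj hr))) := by
        simp [List.getElem_zipWith]
      rw [this]
      have hgd : r.getD j 0 = r[j]'(Nat.lt_of_lt_of_le hj hr) := List.getD_eq_getElem r 0 _
      simp [pvColB, Bool.and_assoc, List.getElem?_eq_getElem (Nat.lt_of_lt_of_le hj hr)]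

theorem any_eq_exists_get (l : List Bool) :
    l.any id = true ↔ ∃ j : Nat, ∃ hj : j < l.length, l[j] = true := by
  simp only [List.any_eq_true, id]
  constructor
  · rintro ⟨x, hx, hid⟩
    obtain ⟨j, hj, he⟩ := List.mem_iff_getElem.mp hx
    exact ⟨j, hj, by rw [he]; exact hid⟩
  · rintro ⟨j, hj, hv⟩
    exact ⟨l[j], List.getElem_mem hj, hv⟩

-- ===== VERDICT (by name: the statement is the Claim_ definition above) =====
theorem some_col_all_pos_spec : Claim_equal_some_col_all_pos := by
  intro m _hDom hPre
  unfold Spec_some_col_all_pos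
  match m with
  | [] => rfl
  | r0 :: rest =>
      have hPre' : ∀ row ∈ r0 :: rest, r0.length ≤ row.length := by
        intro row hr; simpa using hPre row hr
      -- A side
      have hA : some_col_all_pos (r0 :: rest)
          = (List.range r0.length).any (fun j => pvColB (r0 :: rest) j) := by
        simp only [some_col_all_pos, List.length_cons, List.headD_cons]
        rw [if_neg (by simp)]
        rw [pvALoop_any, PySem.List.pyRange_zero_nat]
        rw [List.any_map]
        exact PySem.List.any_congr_mem (fun j _ => pvInner_natCast _ j)
      -- B side
      have hmask : ∀ row ∈ r0 :: rest, (List.replicate r0.length (true : Bool)).length ≤ row.length := by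
        intro row hr; simpa using hPre' row hr
      have hB : some_col_all_pos_alt (r0 :: rest)
          = (List.range r0.length).any (fun j => pvColB (r0 :: rest) j) := by
        simp only [some_col_all_pos_alt]
        apply Bool.eq_iff_iff.mpr
        rw [any_eq_exists_get, List.any_eq_true]
        constructor
        · rintro ⟨j, hj, hval⟩
          have hj' : j < r0.length := by
            rw [pvFold_len _ _ hmask] at hj; simpa using hj
          have hget := pvFold_get (r0 :: rest) (List.replicate r0.length true) hmask j (by simpa using hj')
          rw [List.getElem_replicate, Bool.true_and] at hget
          rw [hval] at hget
          exact ⟨j, List.mem_range.mpr hj', hget.symm⟩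
        · rintro ⟨j, hjr, hcol⟩
          have hj : j < r0.length := List.mem_range.mp hjr
          have hget := pvFold_get (r0 :: rest) (List.replicate r0.length true) hmask j (by simpa using hj)
          rw [List.getElem_replicate, Bool.true_and, hcol] at hget
          exact ⟨j, by rw [pvFold_len _ _ hmask]; simpa using hj, hget⟩
      rw [hA, hB]
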